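-- pv_equiv track=rewrite | github.com/lavishlyinspired/Ontology-Driven-Clinical-Decision-Support | backend/src/db/run_migration.py | _split_cypher_statements
-- ===== SOURCE A (Python) =====
-- def _split_cypher_statements(script: str) -> list[str]:
--     """
--     Split Cypher script into individual statements
--
--     Args:
--         script: The full Cypher script
--
--     Returns:
--         List of individual statements
--     """
--     # Simple split by semicolon (not perfect but works for most cases)
--     # Note: This doesn't handle semicolons in strings properly
--     statements = []
--     current_statement = []
--     in_block_comment = False
--
--     for line in script.split('\n'):
--         line = line.strip()
--
--         # Handle block comments
--         if line.startswith('/*'):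
--             in_block_comment = True
--         if '*/' in line:
--             in_block_comment = False
--             continue
--         if in_block_comment:
--             continue
--
--         # Skip single-line comments
--         if line.startswith('//'):
--             continue
--
--         # Skip empty lines
--         if not line:
--             continue
--
--         # Add line to current statement
--         current_statement.append(line)
--
--         # If line ends with semicolon, it's the end of a statement
--         if line.endswith(';'):
--             # Join the statement and remove the trailing semicolon
--             statement = ' '.join(current_statement)[:-1]
--             statements.append(statement)
--             current_statement = []
--
--     # Add any remaining statement
--     if current_statement:
--         statement = ' '.join(current_statement)
--         if statement.strip():
--             statements.append(statement)
--
--     return statements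
-- ===== SOURCE B (Python) =====
-- def _split_cypher_statements(script: str) -> list[str]:
--     # Phase 1: strip all lines, compute each line's prior block-comment state by a scan,
--     # then select the kept lines with one comprehension over the zipped pairs.
--     lines = [l.strip() for l in script.split('\n')]
--     prior = []
--     st = False
--     for l in lines:
--         prior.append(st)
--         if '*/' in l:
--             st = False
--         elif l.startswith('/*'):
--             st = True
--     cleaned = [l for l, s in zip(lines, prior)
--                if '*/' not in l and not (s or l.startswith('/*'))
--                and not l.startswith('//') and l]
--     # Phase 2: repeatedly cut the cleaned list at its first ';'-terminated line.
--     parts = []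
--     while cleaned:
--         head = next((i for i, l in enumerate(cleaned) if l.endswith(';')), None)
--         if head is None:
--             parts.append(' '.join(cleaned))
--             break
--         parts.append(' '.join(cleaned[:head + 1])[:-1])
--         cleaned = cleaned[head + 1:]
--     return parts
-- ===== Notes on version B (the rewrite author's own statement) =====
-- stated objective: alternative
-- what changed: A's single-pass state machine with a statement buffer is replaced by: a scan computing each line's prior block-comment state plus one zip/filter comprehension to select kept lines, then a loop that repeatedly finds the first ';'-terminated line and cuts the cleaned list there by slicing (no running buffer).
import Mathlib
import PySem

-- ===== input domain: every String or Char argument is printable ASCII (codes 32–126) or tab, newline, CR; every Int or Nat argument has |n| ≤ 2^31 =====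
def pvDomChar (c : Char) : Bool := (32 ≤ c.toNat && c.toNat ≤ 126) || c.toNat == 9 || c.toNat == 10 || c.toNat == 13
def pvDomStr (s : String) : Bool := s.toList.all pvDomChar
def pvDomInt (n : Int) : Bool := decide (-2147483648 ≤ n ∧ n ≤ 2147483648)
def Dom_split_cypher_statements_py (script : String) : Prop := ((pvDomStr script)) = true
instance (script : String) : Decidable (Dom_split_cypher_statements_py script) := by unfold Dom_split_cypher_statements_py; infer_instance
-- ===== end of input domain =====

-- B replaces A's single-pass buffer state machine by a prior-state scan + zip/filter cleaning pass and a cut-at-first-';'-line slicing loop; same cost, different algorithm.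


-- ===== PORT A =====
-- one loop over the lines, state = (statements, current_statement, in_block_comment)
def pvAStep (st : List (List Char) × List (List Char) × Bool) (raw : List Char) :
    List (List Char) × List (List Char) × Bool :=
  let line := PySem.Chars.strip raw
  let inb := if PySem.Chars.startswith line ['/', '*'] then true else st.2.2
  if PySem.Chars.isIn ['*', '/'] line then (st.1, st.2.1, false)
  else if inb then (st.1, st.2.1, inb)
  else if PySem.Chars.startswith line ['/', '/'] then (st.1, st.2.1, inb)
  else if line = [] then (st.1, st.2.1, inb)
  else
    let cur := st.2.1 ++ [line]
    if PySem.Chars.endswith line [';'] then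
      (st.1 ++ [PySem.Chars.slice (PySem.Chars.join [' '] cur) none (some (-1))], [], inb)
    else (st.1, cur, inb)

def split_cypher_statements_py (script : String) : List String :=
  let st := (PySem.Chars.splitOn script.toList ['\n']).foldl pvAStep ([], [], false)
  let res :=
    if st.2.1 ≠ [] then
      let statement := PySem.Chars.join [' '] st.2.1
      if PySem.Chars.strip statement ≠ [] then st.1 ++ [statement] else st.1
    else st.1
  res.map (fun cs => String.ofList cs)

-- ===== PORT B =====
-- B phase 1: the loop computing each line's prior block-comment state ('prior' in Source B)
def pvPrior : List (List Char) → Bool → List Bool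
  | [], _ => []
  | l :: rest, st =>
      st :: pvPrior rest (if PySem.Chars.isIn ['*', '/'] l then false
                          else if PySem.Chars.startswith l ['/', '*'] then true else st)

-- the comprehension's filter condition on a (line, prior-state) pair
def pvKeep (p : List Char × Bool) : Bool :=
  !PySem.Chars.isIn ['*', '/'] p.1 && !(p.2 || PySem.Chars.startswith p.1 ['/', '*']) &&
    !PySem.Chars.startswith p.1 ['/', '/'] && !p.1.isEmpty

-- needed by pvCut's decreasing_by
lemma pvFindIdx?_lt_length (p : List Char → Bool) (xs : List (List Char)) (k : Nat)
    (h : xs.findIdx? p = some k) : k < xs.length := by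
  have := List.findIdx?_eq_some_iff_findIdx_eq.mp h
  omega

-- B phase 2: the while loop — find the first ';'-terminated line, cut there, recurse on the tail
-- (cleaned[:head+1] / cleaned[head+1:] with a nonnegative bound are exactly take/drop)
def pvCut (ls : List (List Char)) : List (List Char) :=
  match h : ls.findIdx? (fun l => PySem.Chars.endswith l [';']) with
  | none => if ls.isEmpty then [] else [PySem.Chars.join [' '] ls]
  | some k =>
      PySem.Chars.slice (PySem.Chars.join [' '] (ls.take (k + 1))) none (some (-1))
        :: pvCut (ls.drop (k + 1))
termination_by ls.length
decreasing_by
  have hk := pvFindIdx?_lt_length _ _ _ h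
  simp only [List.length_drop]
  omega

def split_cypher_statements_py_alt (script : String) : List String :=
  let lines := (PySem.Chars.splitOn script.toList ['\n']).map PySem.Chars.strip
  let cleaned := ((lines.zip (pvPrior lines false)).filter pvKeep).map Prod.fst
  (pvCut cleaned).map (fun cs => String.ofList cs)

-- ===== PRECONDITION & SPEC =====
def Spec_split_cypher_statements_py (script : String) (out : List String) : Prop := out = split_cypher_statements_py_alt script
instance (script : String) (out : List String) : Decidable (Spec_split_cypher_statements_py script out) := by unfold Spec_split_cypher_statements_py; infer_instance

-- ===== CLAIM (what is proved, stated in full; the proofs are below) =====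
def Claim_equal_split_cypher_statements_py : Prop := ∀ (script : String), Dom_split_cypher_statements_py script → Spec_split_cypher_statements_py script (split_cypher_statements_py script)

-- ===== LEMMAS AND PROOFS =====

-- the clean step of the intermediate single filtering fold (proof scaffolding only)
def pvCleanStep (st : List (List Char) × Bool) (raw : List Char) : List (List Char) × Bool :=
  let line := PySem.Chars.strip raw
  let inb := if PySem.Chars.startswith line ['/', '*'] then true else st.2
  if PySem.Chars.isIn ['*', '/'] line then (st.1, false)
  else if !inb && !line.isEmpty && !PySem.Chars.startswith line ['/', '/'] then
    (st.1 ++ [line], inb)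
  else (st.1, inb)

-- the grouping step of the intermediate buffer fold (proof scaffolding only)
def pvGroupStep (st : List (List Char) × List (List Char)) (line : List Char) :
    List (List Char) × List (List Char) :=
  let buf := st.2 ++ [line]
  if PySem.Chars.endswith line [';'] then
    (st.1 ++ [PySem.Chars.slice (PySem.Chars.join [' '] buf) none (some (-1))], [])
  else (st.1, buf)

-- shifting the accumulated cleaned-line list out of one clean step
lemma pvCleanStep_shift (acc : List (List Char)) (b : Bool) (l : List Char) :
    pvCleanStep (acc, b) l =
      (acc ++ (pvCleanStep ([], b) l).1, (pvCleanStep ([], b) l).2) := by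
  simp only [pvCleanStep]
  split_ifs <;> simp

-- the clean fold only appends to its accumulator
lemma pvClean_factor (lines : List (List Char)) :
    ∀ (acc : List (List Char)) (b : Bool),
      lines.foldl pvCleanStep (acc, b) =
        (acc ++ (lines.foldl pvCleanStep ([], b)).1, (lines.foldl pvCleanStep ([], b)).2) := by
  induction lines with
  | nil => intro acc b; simp
  | cons l rest ih =>
    intro acc b
    simp only [List.foldl_cons]
    rw [pvCleanStep_shift acc b l]
    rw [ih (acc ++ (pvCleanStep ([], b) l).1) (pvCleanStep ([], b) l).2]
    rw [show (pvCleanStep ([], b) l : List (List Char) × Bool) = ((pvCleanStep ([], b) l).1, (pvCleanStep ([], b) l).2) from rfl]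
    rw [ih (pvCleanStep ([], b) l).1 (pvCleanStep ([], b) l).2]
    simp

-- A's single pass equals the clean fold followed by the grouping fold
lemma pvMain (lines : List (List Char)) :
    ∀ (stmts cur : List (List Char)) (inb : Bool),
      lines.foldl pvAStep (stmts, cur, inb) =
        ((((lines.foldl pvCleanStep ([], inb)).1).foldl pvGroupStep (stmts, cur)).1,
         (((lines.foldl pvCleanStep ([], inb)).1).foldl pvGroupStep (stmts, cur)).2,
         (lines.foldl pvCleanStep ([], inb)).2) := by
  induction lines with
  | nil => intro stmts cur inb; simp
  | cons l rest ih =>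
    intro stmts cur inb
    simp only [List.foldl_cons]
    rw [show pvCleanStep ([], inb) l = ((pvCleanStep ([], inb) l).1, (pvCleanStep ([], inb) l).2) from rfl,
        pvClean_factor rest, List.foldl_append]
    by_cases h1 : PySem.Chars.isIn ['*', '/'] (PySem.Chars.strip l)
    · simp only [pvAStep, pvCleanStep, h1, if_true]
      rw [ih]
      simp
    · by_cases h2 : (if PySem.Chars.startswith (PySem.Chars.strip l) ['/', '*'] then true else inb) = true
      · simp only [pvAStep, pvCleanStep, h1, h2]
        rw [ih]
        simp
      · by_cases h3 : PySem.Chars.startswith (PySem.Chars.strip l) ['/', '/']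
        · simp only [pvAStep, pvCleanStep, h1, h2, h3]
          rw [ih]
          simp
        · by_cases h4 : PySem.Chars.strip l = []
          · simp only [pvAStep, pvCleanStep, h4]
            rw [ih]
            have hsw : PySem.Chars.startswith ([] : List Char) ['/', '*'] = false := by decide
            have hin : PySem.Chars.isIn ['*', '/'] ([] : List Char) = false := by decide
            have hinb : inb = false := by rw [h4, hsw] at h2; simpa using h2
            simp [hsw, hin, hinb]
          · simp only [pvAStep, pvCleanStep, h1, h2, h3, h4]
            rw [ih]
            by_cases h5 : PySem.Chars.endswith (PySem.Chars.strip l) [';'] <;>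
              simp [pvGroupStep, h4, h5]

-- B's scan + zip/filter cleaning equals the clean fold
lemma pvCleanB (raws : List (List Char)) :
    ∀ (b : Bool),
      (((raws.map PySem.Chars.strip).zip (pvPrior (raws.map PySem.Chars.strip) b)).filter pvKeep).map Prod.fst
        = (raws.foldl pvCleanStep ([], b)).1 := by
  induction raws with
  | nil => intro b; simp
  | cons r rest ih =>
    intro b
    simp only [List.map_cons, pvPrior, List.zip_cons_cons, List.filter_cons, List.foldl_cons]
    rw [show pvCleanStep ([], b) r = ((pvCleanStep ([], b) r).1, (pvCleanStep ([], b) r).2) from rfl,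
        pvClean_factor rest]
    simp only [pvCleanStep, pvKeep]
    by_cases h1 : PySem.Chars.isIn ['*', '/'] (PySem.Chars.strip r)
    · simp [h1, ih]
    · by_cases h2 : (b || PySem.Chars.startswith (PySem.Chars.strip r) ['/', '*']) = true
      · have hinb : (if PySem.Chars.startswith (PySem.Chars.strip r) ['/', '*'] then true else b) = true := by
          rcases Bool.or_eq_true_iff.mp h2 with h | h <;> simp [h]
        simp [h1, h2, hinb, ih]
      · simp only [Bool.or_eq_true, not_or, Bool.not_eq_true] at h2
        have hb : b = false := h2.1
        have hsw : PySem.Chars.startswith (PySem.Chars.strip r) ['/', '*'] = false := h2.2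
        by_cases h3 : PySem.Chars.startswith (PySem.Chars.strip r) ['/', '/']
        · simp [h1, h2, h3, ih]
        · by_cases h4 : (PySem.Chars.strip r).isEmpty
          · simp [h1, h2, h3, h4, ih]
          · have h4' : PySem.Chars.strip r ≠ [] := by simpa [List.isEmpty_iff] using h4
            simp [h1, h2, h3, h4, ih]

-- a nonempty, head-not-whitespace line
def pvQ (l : List Char) : Prop := ∃ c t, l = c :: t ∧ PySem.Chars.isspace c = false

lemma pvHead_strip (raw : List Char) (h : PySem.Chars.strip raw ≠ []) : pvQ (PySem.Chars.strip raw) := by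
  unfold PySem.Chars.strip PySem.Chars.lstrip PySem.Chars.rstrip at h ⊢
  rcases hd : List.dropWhile PySem.Chars.isspace raw with _ | ⟨c, t⟩
  · rw [hd] at h; simp at h
  · rw [hd] at h
    have hc : PySem.Chars.isspace c = false := by
      have := List.head_dropWhile_not (p := PySem.Chars.isspace) (l := raw) (w := by simp [hd])
      simpa [hd] using this
    have hpre : (List.dropWhile PySem.Chars.isspace (c :: t).reverse).reverse <+: c :: t := by
      simpa using (List.dropWhile_suffix (p := PySem.Chars.isspace) (l := (c :: t).reverse)).reverse
    rcases he : (List.dropWhile PySem.Chars.isspace (c :: t).reverse).reverse with _ | ⟨x, xs⟩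
    · rw [he] at h; exact absurd rfl h
    · rw [he] at hpre
      obtain ⟨s, hs⟩ := hpre
      obtain ⟨hx, -⟩ : x = c ∧ xs ++ s = t := by simpa using hs
      exact ⟨x, xs, rfl, by rw [hx]; exact hc⟩

lemma pvStrip_join_ne_nil (l : List Char) (ls : List (List Char)) (hq : pvQ l) :
    PySem.Chars.strip (PySem.Chars.join [' '] (l :: ls)) ≠ [] := by
  rcases hq with ⟨c, t, rfl, hc⟩
  have hjoin : ∃ rest, PySem.Chars.join [' '] ((c :: t) :: ls) = c :: (t ++ rest) := by
    cases ls with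
    | nil => exact ⟨[], by simp [PySem.Chars.join_singleton]⟩
    | cons m ms => exact ⟨[' '] ++ PySem.Chars.join [' '] (m :: ms), by simp [PySem.Chars.join_cons_cons]⟩
  rcases hjoin with ⟨rest, hj⟩
  rw [hj]
  unfold PySem.Chars.strip PySem.Chars.lstrip PySem.Chars.rstrip
  rw [List.dropWhile_cons_of_neg (by simp [hc])]
  intro hcontra
  have hnil : List.dropWhile PySem.Chars.isspace (c :: (t ++ rest)).reverse = [] := by
    simpa using congrArg List.reverse hcontra
  rw [List.dropWhile_eq_nil_iff] at hnil
  have := hnil c (by simp)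
  simp [hc] at this

-- one clean step either keeps the accumulator or appends one nonempty stripped line
lemma pvCleanStep_fst (acc : List (List Char)) (b : Bool) (x : List Char) :
    (pvCleanStep (acc, b) x).1 = acc ∨
      ((pvCleanStep (acc, b) x).1 = acc ++ [PySem.Chars.strip x] ∧ PySem.Chars.strip x ≠ []) := by
  simp only [pvCleanStep]
  split_ifs <;>
    first
      | exact Or.inl rfl
      | · right
          refine ⟨rfl, ?_⟩
          rename_i hcond
          simp only [Bool.and_eq_true, Bool.not_eq_true'] at hcond
          simpa [List.isEmpty_iff] using hcond.1.2

-- every kept cleaned line satisfies pvQ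
lemma pvClean_inv (lines : List (List Char)) :
    ∀ (acc : List (List Char)) (b : Bool), (∀ l ∈ acc, pvQ l) →
      ∀ l ∈ (lines.foldl pvCleanStep (acc, b)).1, pvQ l := by
  induction lines with
  | nil => intro acc b hacc; simpa using hacc
  | cons x rest ih =>
    intro acc b hacc
    simp only [List.foldl_cons]
    rw [show pvCleanStep (acc, b) x = ((pvCleanStep (acc, b) x).1, (pvCleanStep (acc, b) x).2) from rfl]
    apply ih
    intro l hl
    rcases pvCleanStep_fst acc b x with h | ⟨h, hne⟩
    · exact hacc l (h ▸ hl)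
    · rw [h] at hl
      rcases List.mem_append.mp hl with hl | hl
      · exact hacc l hl
      · have hls : l = PySem.Chars.strip x := by simpa using hl
        exact hls ▸ pvHead_strip x hne

-- the grouping buffer only holds cleaned lines
lemma pvGroup_inv (ls : List (List Char)) :
    ∀ (stmts buf : List (List Char)), (∀ l ∈ ls, pvQ l) → (∀ l ∈ buf, pvQ l) →
      ∀ l ∈ (ls.foldl pvGroupStep (stmts, buf)).2, pvQ l := by
  induction ls with
  | nil => intro stmts buf _ hbuf; simpa using hbuf
  | cons x rest ih =>
    intro stmts buf hls hbuf
    simp only [List.foldl_cons]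
    rw [show pvGroupStep (stmts, buf) x = ((pvGroupStep (stmts, buf) x).1, (pvGroupStep (stmts, buf) x).2) from rfl]
    apply ih _ _ (fun l hl => hls l (List.mem_cons_of_mem _ hl))
    intro l hl
    unfold pvGroupStep at hl
    split_ifs at hl
    · simp at hl
    · simp only [List.mem_append, List.mem_singleton] at hl
      rcases hl with hl | rfl
      · exact hbuf l hl
      · exact hls l List.mem_cons_self

-- unfolding pvCut on its two match branches
lemma pvCut_none (ls : List (List Char))
    (h : ls.findIdx? (fun l => PySem.Chars.endswith l [';']) = none) :
    pvCut ls = if ls.isEmpty then [] else [PySem.Chars.join [' '] ls] := by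
  rw [pvCut.eq_def]
  split
  · rfl
  · rename_i k hk; rw [h] at hk; cases hk

lemma pvCut_some (ls : List (List Char)) (k : Nat)
    (h : ls.findIdx? (fun l => PySem.Chars.endswith l [';']) = some k) :
    pvCut ls =
      PySem.Chars.slice (PySem.Chars.join [' '] (ls.take (k + 1))) none (some (-1))
        :: pvCut (ls.drop (k + 1)) := by
  rw [pvCut.eq_def]
  split
  · rename_i hk; rw [h] at hk; cases hk
  · rename_i k' hk; rw [h] at hk; cases hk; rfl

-- findIdx? of a list whose prefix all fails the predicate and whose next element passes it
lemma pvFindIdx?_append_cons (p : List Char → Bool) (xs ys : List (List Char)) (y : List Char)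
    (h : ∀ x ∈ xs, p x = false) (hy : p y = true) :
    (xs ++ y :: ys).findIdx? p = some xs.length := by
  induction xs with
  | nil => simp [List.findIdx?_cons, hy]
  | cons a t ih =>
    have ha : p a = false := h a (by simp)
    simp only [List.cons_append, List.findIdx?_cons, ha]
    rw [ih (fun x hx => h x (by simp [hx]))]
    simp [Option.map_some]

-- the grouping fold plus leftover flush equals B's recursive cutting, given a terminator-free buffer
lemma pvGroup_eq_cut (ls : List (List Char)) :
    ∀ (stmts buf : List (List Char)),
      (∀ l ∈ buf, PySem.Chars.endswith l [';'] = false) →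
      (let g := ls.foldl pvGroupStep (stmts, buf);
        if g.2 ≠ [] then g.1 ++ [PySem.Chars.join [' '] g.2] else g.1)
        = stmts ++ pvCut (buf ++ ls) := by
  induction ls with
  | nil =>
    intro stmts buf hbuf
    have hfi : buf.findIdx? (fun l => PySem.Chars.endswith l [';']) = none :=
      List.findIdx?_eq_none_iff.mpr (fun x hx => by simp [hbuf x hx])
    rw [List.append_nil, pvCut_none buf hfi]
    cases buf with
    | nil => simp
    | cons b bs => simp
  | cons l rest ih =>
    intro stmts buf hbuf
    simp only [List.foldl_cons, pvGroupStep]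
    by_cases hterm : PySem.Chars.endswith l [';'] = true
    · simp only [hterm, if_true]
      rw [ih _ [] (by simp)]
      rw [pvCut_some (buf ++ l :: rest) buf.length
            (pvFindIdx?_append_cons _ buf rest l hbuf hterm)]
      have htake : (buf ++ l :: rest).take (buf.length + 1) = buf ++ [l] := by
        simp [List.take_append]
      have hdrop : (buf ++ l :: rest).drop (buf.length + 1) = rest := by
        simp [List.drop_append]
      simp [htake, hdrop]
    · have hterm' : PySem.Chars.endswith l [';'] = false := by simpa using hterm
      simp only [hterm', Bool.false_eq_true, if_false]
      rw [ih _ (buf ++ [l])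
            (fun x hx => by
              rcases List.mem_append.mp hx with hx | hx
              · exact hbuf x hx
              · simpa [List.mem_singleton.mp hx] using hterm')]
      simp

-- ===== VERDICT (by name: the statement is the Claim_ definition above) =====
theorem split_cypher_statements_py_spec : Claim_equal_split_cypher_statements_py := by
  intro script _
  unfold Spec_split_cypher_statements_py
  have hclean := pvCleanB (PySem.Chars.splitOn script.toList ['\n']) false
  set cleaned := ((PySem.Chars.splitOn script.toList ['\n']).foldl pvCleanStep ([], false)).1 with hcl
  have hbufQ : ∀ l ∈ (cleaned.foldl pvGroupStep ([], [])).2, pvQ l := by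
    apply pvGroup_inv
    · exact pvClean_inv _ [] false (by simp)
    · simp
  have hmain := pvGroup_eq_cut cleaned [] [] (by simp)
  simp only [List.nil_append] at hmain
  rcases hb : (cleaned.foldl pvGroupStep ([], [])).2 with _ | ⟨l, ls⟩
  · rw [hb] at hmain
    simp only [ne_eq, not_true_eq_false, if_false] at hmain
    simp only [split_cypher_statements_py, split_cypher_statements_py_alt, pvMain]
    rw [← hcl]
    simp [hb, hclean, hmain]
  · have hne : PySem.Chars.strip (PySem.Chars.join [' '] (l :: ls)) ≠ [] :=
      pvStrip_join_ne_nil l ls (hbufQ l (by rw [hb]; exact List.mem_cons_self))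
    rw [hb] at hmain
    simp only [ne_eq, reduceCtorEq, not_false_eq_true, if_true] at hmain
    simp only [split_cypher_statements_py, split_cypher_statements_py_alt, pvMain]
    rw [← hcl]
    simp [hb, hne, hclean, hmain]
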